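-- pv_equiv track=rewrite | github.com/Himanshugoyal04/clinical-decision-env | app/env.py | _find_matching_answer
-- ===== SOURCE A (Python) =====
-- from typing import Dict, Any, Optional, List
--
-- def _find_matching_answer(
--
--     question: str,
--     available_answers: Dict[str, str]
-- ) -> Optional[str]:
--     """Find a matching answer for a question using fuzzy matching."""
--     question_lower = question.lower()
--
--     # Direct match
--     for key, answer in available_answers.items():
--         if key.lower() in question_lower or question_lower in key.lower():
--             return answer
--
--     # Keyword matching
--     for key, answer in available_answers.items():
--         key_words = set(key.lower().split())
--         question_words = set(question_lower.split())
--         if len(key_words.intersection(question_words)) >= 2: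
--             return answer
--
--     return None
-- ===== SOURCE B (Python) =====
-- from typing import Dict, Optional
--
-- def _find_matching_answer(
--     question: str,
--     available_answers: Dict[str, str]
-- ) -> Optional[str]:
--     """Single pass: substring match returns immediately; the first keyword
--     match (>= 2 shared lowercase words) is kept as a fallback."""
--     question_lower = question.lower()
--     question_words = set(question_lower.split())
--     fallback = None
--     for key, answer in available_answers.items():
--         key_lower = key.lower()
--         if key_lower in question_lower or question_lower in key_lower:
--             return answer
--         if fallback is None and len(set(key_lower.split()) & question_words) >= 2:
--             fallback = answer
--     return fallback
-- ===== Notes on version B (the rewrite author's own statement) =====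
-- stated objective: simpler
-- what changed: Replaces A's two full passes over the dict (substring pass, then keyword pass) by a single pass that returns on a substring hit and records the first keyword hit as a fallback, with question_words computed once instead of per iteration.
import Mathlib
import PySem

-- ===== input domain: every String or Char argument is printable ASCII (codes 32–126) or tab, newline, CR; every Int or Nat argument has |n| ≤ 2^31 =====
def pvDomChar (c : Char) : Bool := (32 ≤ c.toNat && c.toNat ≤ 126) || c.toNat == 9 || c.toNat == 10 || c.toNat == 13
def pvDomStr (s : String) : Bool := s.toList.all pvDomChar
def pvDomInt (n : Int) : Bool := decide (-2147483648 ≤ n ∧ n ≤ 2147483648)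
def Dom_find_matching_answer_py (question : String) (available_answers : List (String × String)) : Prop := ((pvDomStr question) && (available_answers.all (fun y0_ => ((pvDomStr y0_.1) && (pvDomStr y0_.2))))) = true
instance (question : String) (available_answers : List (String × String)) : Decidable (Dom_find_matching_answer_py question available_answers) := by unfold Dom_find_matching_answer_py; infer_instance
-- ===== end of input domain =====

-- B: one pass with early return on substring match and a saved first keyword fallback, instead of A's two passes (simpler).


-- ===== PORT A =====
-- loop 1: direct substring match (first hit)
def pvALoop1 (ql : String) : List (String × String) → Option String
  | [] => none
  | (k, a) :: rest =>
    if PySem.Str.isIn (PySem.Str.lower k) ql || PySem.Str.isIn ql (PySem.Str.lower k) then some a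
    else pvALoop1 ql rest

-- loop 2: keyword match (>= 2 shared lowercase words, first hit)
def pvALoop2 (ql : String) : List (String × String) → Option String
  | [] => none
  | (k, a) :: rest =>
    let key_words := PySem.Set.ofList (PySem.Str.split₀ (PySem.Str.lower k))
    let question_words := PySem.Set.ofList (PySem.Str.split₀ ql)
    if PySem.Set.len (PySem.Set.inter key_words question_words) ≥ 2 then some a
    else pvALoop2 ql rest

def find_matching_answer_py (question : String) (available_answers : List (String × String)) : Option String :=
  let question_lower := PySem.Str.lower question
  match pvALoop1 question_lower available_answers with
  | some a => some a
  | none => pvALoop2 question_lower available_answers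

-- ===== PORT B =====
-- B changes A's two passes to one pass with an early return and a saved fallback ("simpler").
def pvBLoop (ql : String) (qw : PySem.Set String) : List (String × String) → Option String → Option String
  | [], fallback => fallback
  | (k, a) :: rest, fallback =>
    let kl := PySem.Str.lower k
    if PySem.Str.isIn kl ql || PySem.Str.isIn ql kl then some a
    else
      pvBLoop ql qw rest
        (if fallback.isNone &&
             decide (PySem.Set.len (PySem.Set.inter (PySem.Set.ofList (PySem.Str.split₀ kl)) qw) ≥ 2)
         then some a else fallback)

def find_matching_answer_py_alt (question : String) (available_answers : List (String × String)) : Option String :=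
  let question_lower := PySem.Str.lower question
  pvBLoop question_lower (PySem.Set.ofList (PySem.Str.split₀ question_lower)) available_answers none

-- ===== PRECONDITION & SPEC =====
def Spec_find_matching_answer_py (question : String) (available_answers : List (String × String)) (out : Option String) : Prop := out = find_matching_answer_py_alt question available_answers
instance (question : String) (available_answers : List (String × String)) (out : Option String) : Decidable (Spec_find_matching_answer_py question available_answers out) := by unfold Spec_find_matching_answer_py; infer_instance

-- ===== CLAIM (what is proved, stated in full; the proofs are below) =====
def Claim_equal_find_matching_answer_py : Prop := ∀ (question : String) (available_answers : List (String × String)), Dom_find_matching_answer_py question available_answers → Spec_find_matching_answer_py question available_answers (find_matching_answer_py question available_answers)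

-- ===== LEMMAS AND PROOFS =====

-- ===== VERDICT (by name: the statement is the Claim_ definition above) =====
-- key invariant: one pass with fallback = substring pass, else fallback, else keyword pass
theorem pvBLoop_eq (ql : String) (l : List (String × String)) (fb : Option String) :
    pvBLoop ql (PySem.Set.ofList (PySem.Str.split₀ ql)) l fb
      = (pvALoop1 ql l).or (fb.or (pvALoop2 ql l)) := by
  induction l generalizing fb with
  | nil => cases fb <;> rfl
  | cons kv rest ih =>
    obtain ⟨k, a⟩ := kv
    simp only [pvBLoop, pvALoop1, pvALoop2]
    by_cases h : (PySem.Str.isIn (PySem.Str.lower k) ql || PySem.Str.isIn ql (PySem.Str.lower k)) = true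
    · rw [if_pos h, if_pos h]; rfl
    · rw [if_neg h, if_neg h, ih]
      cases fb with
      | some f => simp only [Option.isNone_some, Bool.false_and, Bool.false_eq_true,
          if_false, Option.some_or]
      | none =>
        simp only [Option.isNone_none, Bool.true_and, decide_eq_true_eq, ge_iff_le,
          Option.none_or]
        split_ifs with hk
        · simp only [Option.some_or]
        · simp only [Option.none_or]

theorem find_matching_answer_py_spec : Claim_equal_find_matching_answer_py := by
  intro question available_answers _
  unfold Spec_find_matching_answer_py find_matching_answer_py find_matching_answer_py_alt
  rw [pvBLoop_eq]
  cases hA : pvALoop1 (PySem.Str.lower question) available_answers <;> simp [hA]
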